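-- pv_equiv track=rewrite | github.com/ShapeLayer/training | tasks/online_judge/baekjoon/python/27111.py | compute
-- ===== SOURCE A (Python) =====
-- def compute(n: int, logs: list[tuple[int]]) -> int:
--     enters = {}
--     skipped = 0
--     for log in logs:
--         a, b = log
--         if b == 1:
--             if a in enters:
--                 if enters[a]:
--                     skipped += 1
--             enters[a] = True
--         else:
--             if a not in enters:
--                 skipped += 1
--             else:
--                 if not enters[a]:
--                     skipped += 1
--             enters[a] = False
--     for each in enters:
--         if enters[each]:
--             skipped += 1
--     return skipped
-- ===== SOURCE B (Python) =====
-- def compute(n: int, logs: list[tuple[int]]) -> int: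
--     groups = {}
--     for a, b in logs:
--         groups.setdefault(a, []).append(b)
--     total = 0
--     for bs in groups.values():
--         inside = False
--         c = 0
--         for b in bs:
--             if b == 1:
--                 if inside:
--                     c += 1
--                 inside = True
--             else:
--                 if not inside:
--                     c += 1
--                 inside = False
--         total += c + (1 if inside else 0)
--     return total
-- ===== Notes on version B (the rewrite author's own statement) =====
-- stated objective: alternative
-- what changed: Replaces A's single global pass with a boolean-dict state machine plus a final dict sweep by a group-then-scan decomposition: one pass groups each id's flag sequence, then each user's sequence is scanned independently with a local 'inside' boolean and the per-user counts are summed.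
import Mathlib
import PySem

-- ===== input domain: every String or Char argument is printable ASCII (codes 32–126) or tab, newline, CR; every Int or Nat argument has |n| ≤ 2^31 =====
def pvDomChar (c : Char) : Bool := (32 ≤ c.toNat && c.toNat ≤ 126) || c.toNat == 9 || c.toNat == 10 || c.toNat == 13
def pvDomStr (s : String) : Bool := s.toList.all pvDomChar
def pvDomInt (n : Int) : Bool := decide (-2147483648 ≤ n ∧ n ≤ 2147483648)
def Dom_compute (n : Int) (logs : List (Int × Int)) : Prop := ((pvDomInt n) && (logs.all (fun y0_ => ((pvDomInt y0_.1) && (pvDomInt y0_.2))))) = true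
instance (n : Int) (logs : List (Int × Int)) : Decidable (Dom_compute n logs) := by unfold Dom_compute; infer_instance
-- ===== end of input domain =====

-- B re-implements A by grouping each id's flags first and scanning each user independently (alternative decomposition, same cost).

-- ===== PORT A =====
-- one step of A's loop over logs: state = (enters dict, skipped)
def stepA (st : PySem.Dict Int Bool × Int) (log : Int × Int) : PySem.Dict Int Bool × Int :=
  let enters := st.1
  let skipped := st.2
  let a := log.1
  let b := log.2
  if b == 1 then
    (enters.insert a true,
     if enters.contains a then (if enters.getD a false then skipped + 1 else skipped) else skipped)
  else
    (enters.insert a false,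
     if !enters.contains a then skipped + 1
      else (if !(enters.getD a false) then skipped + 1 else skipped))

def compute (n : Int) (logs : List (Int × Int)) : Int :=
  let st := logs.foldl stepA (PySem.Dict.empty, 0)
  -- final loop: for each in enters: if enters[each]: skipped += 1
  st.1.items.foldl (fun skipped kv => if kv.2 then skipped + 1 else skipped) st.2

-- ===== PORT B =====
-- one step of B's inner loop: state = (inside, c)
def stepB (st : Bool × Int) (b : Int) : Bool × Int :=
  if b == 1 then (true, if st.1 then st.2 + 1 else st.2)
  else (false, if !st.1 then st.2 + 1 else st.2)

-- per-user scan of B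
def userCount (bs : List Int) : Int :=
  let st := bs.foldl stepB (false, 0)
  st.2 + (if st.1 then 1 else 0)

def compute_alt (n : Int) (logs : List (Int × Int)) : Int :=
  let groups := logs.foldl (fun (d : PySem.Dict Int (List Int)) p => d.modify p.1 [] (· ++ [p.2])) PySem.Dict.empty
  groups.values.foldl (fun total bs => total + userCount bs) 0

-- ===== PRECONDITION & SPEC =====
def Spec_compute (n : Int) (logs : List (Int × Int)) (out : Int) : Prop := out = compute_alt n logs
instance (n : Int) (logs : List (Int × Int)) (out : Int) : Decidable (Spec_compute n logs out) := by unfold Spec_compute; infer_instance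

-- ===== CLAIM (what is proved, stated in full; the proofs are below) =====
def Claim_equal_compute : Prop := ∀ (n : Int) (logs : List (Int × Int)), Dom_compute n logs → Spec_compute n logs (compute n logs)

-- ===== LEMMAS AND PROOFS =====
-- the ordered list of flags of id k in logs
def flagsOf (k : Int) (logs : List (Int × Int)) : List Int :=
  (logs.filter (fun p => p.1 == k)).map (·.2)

-- A's dict evolution, isolated
def dictStep (d : PySem.Dict Int Bool) (p : Int × Int) : PySem.Dict Int Bool :=
  d.insert p.1 (p.2 == 1)

def bonus (i : Bool) : Int := if i then 1 else 0

def delta (i : Bool) (b : Int) : Int :=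
  if b == 1 then (if i then 1 else 0) else (if i then 0 else 1)

-- distinct ids in first-occurrence order
def idsOf (logs : List (Int × Int)) : List Int := PySem.Set.update [] (logs.map (·.1))

-- final inside-state after a flag sequence
def lastIn (bs : List Int) : Bool := bs.foldl (fun _ b => b == 1) false

-- step characterisations
theorem stepA_fst (d : PySem.Dict Int Bool) (s : Int) (p : Int × Int) :
    (stepA (d, s) p).1 = dictStep d p := by
  cases hb : (p.2 == 1) <;> simp [stepA, dictStep, hb]

theorem stepA_snd (d : PySem.Dict Int Bool) (s : Int) (p : Int × Int) :
    (stepA (d, s) p).2 = s + delta (d.getD p.1 false) p.2 := by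
  by_cases hc : d.contains p.1 = true
  · cases hb : (p.2 == 1) <;> cases hd : d.getD p.1 false <;>
      simp [stepA, delta, hb, hc, hd]
  · have hc' : d.contains p.1 = false := by simpa using hc
    have hd : d.getD p.1 false = false :=
      PySem.Dict.getD_of_not_contains d false hc'
    cases hb : (p.2 == 1) <;> simp [stepA, delta, hb, hc', hd]

theorem stepB_eq (i : Bool) (c : Int) (b : Int) :
    stepB (i, c) b = ((b == 1), c + delta i b) := by
  cases hb : (b == 1) <;> cases i <;> simp [stepB, delta, hb]

-- the dict part of A's fold is a pure insert-fold
theorem foldA_fst (logs : List (Int × Int)) : ∀ (d : PySem.Dict Int Bool) (s : Int),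
    (logs.foldl stepA (d, s)).1 = logs.foldl dictStep d := by
  induction logs with
  | nil => intro d s; rfl
  | cons p rest ih =>
    intro d s
    simp only [List.foldl]
    calc (rest.foldl stepA (stepA (d, s) p)).1
        = (rest.foldl stepA ((stepA (d, s) p).1, (stepA (d, s) p).2)).1 := by rw [Prod.mk.eta]
      _ = rest.foldl dictStep (stepA (d, s) p).1 := ih _ _
      _ = rest.foldl dictStep (dictStep d p) := by rw [stepA_fst]

-- flags of k in a cons
theorem flagsOf_cons (k : Int) (p : Int × Int) (rest : List (Int × Int)) :
    flagsOf k (p :: rest) = if p.1 = k then p.2 :: flagsOf k rest else flagsOf k rest := by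
  by_cases h : p.1 = k
  · simp [flagsOf, List.filter, h]
  · have hb : (p.1 == k) = false := by simpa using h
    simp [flagsOf, List.filter, h, hb]

theorem flagsOf_append_singleton (k : Int) (logs : List (Int × Int)) (p : Int × Int) :
    flagsOf k (logs ++ [p]) = flagsOf k logs ++ (if p.1 = k then [p.2] else []) := by
  by_cases h : p.1 = k
  · simp [flagsOf, List.filter_append, List.filter, h]
  · have hb : (p.1 == k) = false := by simpa using h
    simp [flagsOf, List.filter_append, List.filter, h, hb]

theorem flagsOf_eq_nil (k : Int) (logs : List (Int × Int)) (h : k ∉ logs.map (·.1)) :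
    flagsOf k logs = [] := by
  simp only [flagsOf, List.map_eq_nil_iff, List.filter_eq_nil_iff]
  intro p hp
  simp only [beq_iff_eq]
  intro hpk
  have hmem : p.1 ∈ logs.map (·.1) := List.mem_map_of_mem hp
  exact h (hpk ▸ hmem)

-- lookup in the insert-fold dict = last flag of the key
theorem getD_foldl_dictStep (logs : List (Int × Int)) : ∀ (d : PySem.Dict Int Bool) (k : Int),
    (logs.foldl dictStep d).getD k false
      = (flagsOf k logs).foldl (fun _ b => b == 1) (d.getD k false) := by
  induction logs with
  | nil => intro d k; simp [flagsOf]
  | cons p rest ih =>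
    intro d k
    simp only [List.foldl]
    rw [ih]
    by_cases h : p.1 = k
    · simp [flagsOf_cons, h, dictStep]
    · have : ((dictStep d p).getD k false) = d.getD k false := by
        simp [dictStep, PySem.Dict.getD_insert, Ne.symm h]
      simp [flagsOf_cons, h, this]

theorem lastIn_append (bs : List Int) (x : Int) : lastIn (bs ++ [x]) = (x == 1) := by
  simp [lastIn, List.foldl_append]

-- B's inner fold: first component is lastIn
theorem foldB_fst (bs : List Int) : ∀ (i : Bool) (c : Int),
    (bs.foldl stepB (i, c)).1 = bs.foldl (fun _ b => b == 1) i := by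
  induction bs with
  | nil => intro i c; rfl
  | cons b rest ih =>
    intro i c
    simp only [List.foldl, stepB_eq]
    exact ih _ _

theorem userCount_append (bs : List Int) (x : Int) :
    userCount (bs ++ [x])
      = userCount bs - bonus (lastIn bs) + delta (lastIn bs) x + bonus (x == 1) := by
  have h : (bs.foldl stepB (false, 0)) = ((bs.foldl stepB (false, 0)).1, (bs.foldl stepB (false, 0)).2) := by
    rw [Prod.mk.eta]
  simp only [userCount, List.foldl_append, List.foldl]
  rw [h, stepB_eq, foldB_fst]
  simp only [bonus, lastIn]
  split <;> split <;> omega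

theorem userCount_singleton (x : Int) :
    userCount [x] = delta false x + bonus (x == 1) := by
  simp only [userCount, List.foldl, stepB_eq, bonus]
  omega

-- plain sum shapes
theorem foldl_bonus (l : List (Int × Bool)) : ∀ (s : Int),
    l.foldl (fun s kv => if kv.2 then s + 1 else s) s
      = s + (l.map (fun kv => bonus kv.2)).sum := by
  induction l with
  | nil => intro s; simp
  | cons kv rest ih =>
    intro s
    cases h : kv.2
    · simp [List.foldl, h, ih, bonus]
    · simp [List.foldl, h, ih, bonus]
      ring

theorem foldl_userCount (l : List (List Int)) : ∀ (t : Int),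
    l.foldl (fun t bs => t + userCount bs) t = t + (l.map userCount).sum := by
  induction l with
  | nil => intro t; simp
  | cons bs rest ih => intro t; simp [List.foldl, ih]; ring

-- ids facts
theorem nodup_idsOf (logs : List (Int × Int)) : (idsOf logs).Nodup :=
  PySem.Set.nodup_update _ _ List.nodup_nil

theorem mem_idsOf (k : Int) (logs : List (Int × Int)) :
    k ∈ idsOf logs ↔ k ∈ logs.map (·.1) := by
  simp [idsOf, PySem.Set.mem_update]

theorem idsOf_append_singleton (logs : List (Int × Int)) (p : Int × Int) :
    idsOf (logs ++ [p]) = PySem.Set.add (idsOf logs) p.1 := by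
  simp [idsOf, List.map_append, PySem.Set.update_append, PySem.Set.update_cons, PySem.Set.update_nil]

-- updating one entry of a sum over a Nodup index list
theorem sum_map_update (K : List Int) (f g : Int → Int) (a : Int) :
    K.Nodup → a ∈ K → (∀ k ∈ K, k ≠ a → f k = g k) →
    (K.map g).sum = (K.map f).sum + (g a - f a) := by
  induction K with
  | nil => intro _ h; cases h
  | cons x xs ih =>
    intro hnd hmem hagree
    rcases List.mem_cons.mp hmem with hx | hx
    · subst hx
      have hnotin : a ∉ xs := (List.nodup_cons.mp hnd).1
      have : xs.map g = xs.map f := by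
        apply List.map_congr_left
        intro k hk
        exact (hagree k (List.mem_cons_of_mem _ hk) (fun hka => hnotin (hka ▸ hk))).symm
      simp [this]; ring
    · have hfx : f x = g x := hagree x List.mem_cons_self (fun hxa => by
        subst hxa
        exact (List.nodup_cons.mp hnd).1 hx)
      have := ih (List.nodup_cons.mp hnd).2 hx (fun k hk hka => hagree k (List.mem_cons_of_mem _ hk) hka)
      simp only [List.map_cons, List.sum_cons, this, hfx]; ring

-- A's result as a sum over ids
theorem A_eq_sum (n : Int) (logs : List (Int × Int)) :
    compute n logs
      = (logs.foldl stepA (PySem.Dict.empty, 0)).2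
        + ((idsOf logs).map (fun k => bonus (lastIn (flagsOf k logs)))).sum := by
  have hkeys : (logs.foldl dictStep PySem.Dict.empty).keys = idsOf logs := by
    have := PySem.Dict.keys_foldl_insert_key (l := logs) (key := fun p : Int × Int => p.1)
      (f := fun _ p => (p.2 == 1)) (d := (PySem.Dict.empty : PySem.Dict Int Bool))
    simpa [dictStep, idsOf, PySem.Dict.keys_empty] using this
  have hnd : (logs.foldl dictStep PySem.Dict.empty).keys.Nodup := by
    rw [hkeys]; exact nodup_idsOf logs
  have hitems : (logs.foldl dictStep PySem.Dict.empty).items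
      = (idsOf logs).map (fun k => (k, (logs.foldl dictStep PySem.Dict.empty).getD k false)) := by
    rw [← hkeys]
    exact PySem.Dict.items_eq_map_keys _ hnd false
  simp only [compute, foldA_fst, foldl_bonus, hitems, List.map_map]
  congr 1
  apply congrArg
  apply List.map_congr_left
  intro k _
  simp [Function.comp, getD_foldl_dictStep, PySem.Dict.getD_empty, lastIn]

-- B's result as a sum over ids
theorem B_eq_sum (n : Int) (logs : List (Int × Int)) :
    compute_alt n logs = ((idsOf logs).map (fun k => userCount (flagsOf k logs))).sum := by
  have hkeys : (logs.foldl (fun (d : PySem.Dict Int (List Int)) p => d.modify p.1 [] (· ++ [p.2])) PySem.Dict.empty).keys = idsOf logs := by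
    have := PySem.Dict.keys_foldl_modify_key (l := logs) (key := fun p : Int × Int => p.1)
      (d0 := ([] : List Int)) (f := fun _ p => (· ++ [p.2])) (d := (PySem.Dict.empty : PySem.Dict Int (List Int)))
    simpa [idsOf, PySem.Dict.keys_empty] using this
  have hnd : (logs.foldl (fun (d : PySem.Dict Int (List Int)) p => d.modify p.1 [] (· ++ [p.2])) PySem.Dict.empty).keys.Nodup := by
    rw [hkeys]; exact nodup_idsOf logs
  have hvals : (logs.foldl (fun (d : PySem.Dict Int (List Int)) p => d.modify p.1 [] (· ++ [p.2])) PySem.Dict.empty).values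
      = (idsOf logs).map (fun k => (logs.foldl (fun (d : PySem.Dict Int (List Int)) p => d.modify p.1 [] (· ++ [p.2])) PySem.Dict.empty).getD k []) := by
    rw [← hkeys]
    exact PySem.Dict.values_eq_map_keys _ hnd []
  simp only [compute_alt, hvals, foldl_userCount, List.map_map, zero_add]
  apply congrArg
  apply List.map_congr_left
  intro k _
  have := PySem.Dict.getD_foldl_modify_append (l := logs) (d := (PySem.Dict.empty : PySem.Dict Int (List Int))) (c := k)
  simp [Function.comp, this, PySem.Dict.getD_empty, flagsOf]

-- the central invariant
theorem main_sum (logs : List (Int × Int)) :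
    (logs.foldl stepA (PySem.Dict.empty, 0)).2
      + ((idsOf logs).map (fun k => bonus (lastIn (flagsOf k logs)))).sum
    = ((idsOf logs).map (fun k => userCount (flagsOf k logs))).sum := by
  induction logs using List.reverseRecOn with
  | nil => simp [idsOf, PySem.Set.update_nil]
  | append_singleton logs p ih =>
    have hS : (List.foldl stepA (PySem.Dict.empty, 0) (logs ++ [p])).2
        = (logs.foldl stepA (PySem.Dict.empty, 0)).2
          + delta (lastIn (flagsOf p.1 logs)) p.2 := by
      rw [List.foldl_append]
      have hpair : (logs.foldl stepA ((PySem.Dict.empty : PySem.Dict Int Bool), (0 : Int)))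
          = ((logs.foldl stepA (PySem.Dict.empty, 0)).1, (logs.foldl stepA (PySem.Dict.empty, 0)).2) := by
        rw [Prod.mk.eta]
      simp only [List.foldl]
      rw [hpair, stepA_snd, foldA_fst, getD_foldl_dictStep]
      simp [PySem.Dict.getD_empty, lastIn]
    by_cases hmem : p.1 ∈ idsOf logs
    · have hids : idsOf (logs ++ [p]) = idsOf logs := by
        rw [idsOf_append_singleton, PySem.Set.add_of_mem hmem]
      have hagree : ∀ k ∈ idsOf logs, k ≠ p.1 → flagsOf k (logs ++ [p]) = flagsOf k logs := by
        intro k _ hk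
        rw [flagsOf_append_singleton]
        simp [Ne.symm hk]
      have hb := sum_map_update (idsOf logs) (fun k => bonus (lastIn (flagsOf k logs)))
        (fun k => bonus (lastIn (flagsOf k (logs ++ [p])))) p.1 (nodup_idsOf logs) hmem
        (by intro k hk hka; simp only [hagree k hk hka])
      have hu := sum_map_update (idsOf logs) (fun k => userCount (flagsOf k logs))
        (fun k => userCount (flagsOf k (logs ++ [p]))) p.1 (nodup_idsOf logs) hmem
        (by intro k hk hka; simp only [hagree k hk hka])
      have hflag : flagsOf p.1 (logs ++ [p]) = flagsOf p.1 logs ++ [p.2] := by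
        rw [flagsOf_append_singleton]; simp
      rw [hS, hids, hb, hu]
      simp only [hflag, userCount_append, lastIn_append]
      linarith [ih]
    · have hids : idsOf (logs ++ [p]) = idsOf logs ++ [p.1] := by
        rw [idsOf_append_singleton, PySem.Set.add_of_not_mem hmem]
      have hnilflag : flagsOf p.1 logs = [] :=
        flagsOf_eq_nil _ _ (fun h => hmem ((mem_idsOf _ _).mpr h))
      have hflag : flagsOf p.1 (logs ++ [p]) = [p.2] := by
        rw [flagsOf_append_singleton, hnilflag]; simp
      have hcongr : ∀ (F : List Int → Int),
          ((idsOf logs).map (fun k => F (flagsOf k (logs ++ [p]))))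
            = ((idsOf logs).map (fun k => F (flagsOf k logs))) := by
        intro F
        apply List.map_congr_left
        intro k hk
        have hne : p.1 ≠ k := fun h => hmem (h ▸ hk)
        rw [flagsOf_append_singleton]
        simp [hne]
      rw [hS, hids]
      have h1 : lastIn ([] : List Int) = false := rfl
      have h2 : lastIn [p.2] = (p.2 == 1) := by simpa using lastIn_append [] p.2
      simp only [List.map_append, List.sum_append, List.map_cons, List.map_nil,
        List.sum_cons, List.sum_nil, hcongr (fun bs => bonus (lastIn bs)),
        hcongr (fun bs => userCount bs), hflag, hnilflag, h1, h2, userCount_singleton]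
      linarith [ih]

-- ===== VERDICT (by name: the statement is the Claim_ definition above) =====
theorem compute_spec : Claim_equal_compute := by
  intro n logs _
  unfold Spec_compute
  rw [A_eq_sum, B_eq_sum, main_sum]
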